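-- pv_equiv track=rewrite | github.com/facundou94/PFH_Google_Yelp | ETL.py | categorize_res_fast
-- ===== SOURCE A (Python) =====
-- def categorize_res_fast(categories):
--     if isinstance(categories, str):
--         if any(keyword in categories for keyword in ["Fast food restaurant", "Hamburguer restaurant", "American restaurant",
--                                                      "Sandwich shop", "Pizza restaurant", "Pizza delivery",
--                                                      "Pizza takeout","Pizza takeaway","Hot dog restaurant",
--                                                      "Hot dog stand", "Chicken wings restaurant", "Chicken restaurant",
--                                                      "Fried Chicken takeaway", "Barbecue restaurant", "Salad shop"]):
--             return 1
--     return 0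
-- ===== SOURCE B (Python) =====
-- _KEYWORDS = ["Fast food restaurant", "Hamburguer restaurant", "American restaurant",
--              "Sandwich shop", "Pizza restaurant", "Pizza delivery",
--              "Pizza takeout", "Pizza takeaway", "Hot dog restaurant",
--              "Hot dog stand", "Chicken wings restaurant", "Chicken restaurant",
--              "Fried Chicken takeaway", "Barbecue restaurant", "Salad shop"]
--
-- def categorize_res_fast(categories):
--     # single left-to-right scan over positions; at each position test whether
--     # some keyword starts there
--     if isinstance(categories, str):
--         for i in range(len(categories) + 1):
--             for kw in _KEYWORDS:
--                 if categories.startswith(kw, i):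
--                     return 1
--     return 0
-- ===== Notes on version B (the rewrite author's own statement) =====
-- stated objective: alternative
-- what changed: A runs one full substring search per keyword over the whole string; B makes a single left-to-right scan over positions, testing at each position whether any keyword starts there (the traversal order is inverted: positions outer, keywords inner).
import Mathlib
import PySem

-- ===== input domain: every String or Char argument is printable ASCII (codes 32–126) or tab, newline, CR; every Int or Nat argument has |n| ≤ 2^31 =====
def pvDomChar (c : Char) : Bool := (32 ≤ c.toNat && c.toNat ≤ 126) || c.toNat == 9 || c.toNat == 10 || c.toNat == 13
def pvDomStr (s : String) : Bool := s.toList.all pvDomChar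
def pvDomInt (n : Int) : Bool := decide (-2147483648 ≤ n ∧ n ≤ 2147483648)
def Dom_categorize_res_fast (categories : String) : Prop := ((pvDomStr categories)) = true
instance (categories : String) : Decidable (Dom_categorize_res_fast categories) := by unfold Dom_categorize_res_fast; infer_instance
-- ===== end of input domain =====

-- B replaces A's per-keyword full substring searches by a single left-to-right
-- scan over positions testing at each one whether some keyword starts there
-- (alternative traversal, same cost).

def pvKeywords : List String :=
  ["Fast food restaurant", "Hamburguer restaurant", "American restaurant",
   "Sandwich shop", "Pizza restaurant", "Pizza delivery",
   "Pizza takeout", "Pizza takeaway", "Hot dog restaurant",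
   "Hot dog stand", "Chicken wings restaurant", "Chicken restaurant",
   "Fried Chicken takeaway", "Barbecue restaurant", "Salad shop"]

-- ===== PORT A =====
-- any(keyword in categories for keyword in [...]); the isinstance guard is
-- always true for a String argument
def categorize_res_fast (categories : String) : Int :=
  if pvKeywords.any (fun keyword => PySem.Str.isIn keyword categories) then 1 else 0

-- ===== PORT B =====
-- the 'for i in range(len(categories)+1)' loop over start positions, as
-- structural recursion over the suffixes of the character list; the inner
-- 'categories.startswith(kw, i)' is a prefix test on the current suffix
def pvScan (cs : List Char) : Int :=
  if pvKeywords.any (fun kw => PySem.Chars.startswith cs kw.toList) then 1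
  else
    match cs with
    | [] => 0
    | _ :: t => pvScan t

def categorize_res_fast_alt (categories : String) : Int :=
  pvScan categories.toList

-- ===== PRECONDITION & SPEC =====
def Spec_categorize_res_fast (categories : String) (out : Int) : Prop := out = categorize_res_fast_alt categories
instance (categories : String) (out : Int) : Decidable (Spec_categorize_res_fast categories out) := by unfold Spec_categorize_res_fast; infer_instance

-- ===== CLAIM (what is proved, stated in full; the proofs are below) =====
def Claim_equal_categorize_res_fast : Prop := ∀ (categories : String), Dom_categorize_res_fast categories → Spec_categorize_res_fast categories (categorize_res_fast categories)

-- ===== LEMMAS AND PROOFS =====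

-- the position scan finds a hit iff some keyword is an infix of the list
theorem pvScan_eq (cs : List Char) :
    pvScan cs = if pvKeywords.any (fun kw => PySem.Chars.isIn kw.toList cs) then 1 else 0 := by
  induction cs with
  | nil =>
    unfold pvScan
    congr 1
  | cons c t ih =>
    unfold pvScan
    by_cases h : pvKeywords.any (fun kw => PySem.Chars.startswith (c :: t) kw.toList) = true
    · rw [if_pos h]
      have : pvKeywords.any (fun kw => PySem.Chars.isIn kw.toList (c :: t)) = true := by
        simp only [List.any_eq_true] at h ⊢
        obtain ⟨kw, hkw, hp⟩ := h
        exact ⟨kw, hkw, by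
          rw [PySem.Chars.isIn_iff_infix]
          exact (PySem.Chars.startswith_iff _ _ |>.mp hp).isInfix⟩
      rw [if_pos this]
    · rw [if_neg h]
      show pvScan t = _
      rw [ih]
      congr 1
      simp only [List.any_eq_true, eq_iff_iff]
      constructor
      · rintro ⟨kw, hkw, hi⟩
        refine ⟨kw, hkw, ?_⟩
        rw [PySem.Chars.isIn_iff_infix] at hi ⊢
        exact hi.trans (List.suffix_cons c t).isInfix
      · rintro ⟨kw, hkw, hi⟩
        rw [PySem.Chars.isIn_iff_infix, List.infix_cons_iff] at hi
        rcases hi with hp | hi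
        · exact absurd (List.any_eq_true.mpr ⟨kw, hkw, (PySem.Chars.startswith_iff _ _).mpr hp⟩) h
        · exact ⟨kw, hkw, (PySem.Chars.isIn_iff_infix _ _).mpr hi⟩

-- ===== VERDICT (by name: the statement is the Claim_ definition above) =====
theorem categorize_res_fast_spec : Claim_equal_categorize_res_fast := by
  intro categories _
  unfold Spec_categorize_res_fast categorize_res_fast categorize_res_fast_alt
  rw [pvScan_eq]
  simp only [PySem.Str.isIn_eq]
  rfl
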